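-- pv_equiv track=rewrite | github.com/f-dangel/vivit | vivit/utils/subsampling.py | sample_output_mapping
-- ===== SOURCE A (Python) =====
-- def is_subset(subsampling, reference):
--     """Return whether indices specified by ``subsampling`` are subset of the reference.
--
--     Args:
--         subsampling ([int] or None): Sample indices
--         reference ([int] or None): Reference set.
--
--     Returns:
--         bool: Whether all indices are contained in the reference set.
--     """
--     if reference is None:
--         return True
--     elif subsampling is None and reference is not None:
--         return False
--     else:
--         return set(subsampling).issubset(set(reference))
--
-- def sample_output_mapping(idx_samples, idx_all):
--     """Return access indices for sub-sampled BackPACK quantities.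
--
--     Args:
--         idx_samples ([int]): Mini-batch sample indices of samples to be accessed.
--         idx_all ([int] or None): Sub-sampling indices used in the BackPACK extension
--             whose savefield is being accessed. ``None`` signifies the entire batch
--             was used.
--
--     Example:
--         Let's say we want to compute individual gradients for samples 0, 2, 3 from a
--         mini-batch with ``N = 5`` samples. Those samples are described by the indices
--
--         ``samples = [0, 1, 2, 3, 4]``
--
--         Calling ``BatchGrad`` with ``subsampling = [0, 2, 3]``, will result in
--
--         ``grad_batch = [∇f₀, ∇f₂, ∇f₃]``
--
--         To access the gradient for sample 3, we need a mapping: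
--
--         ``mapping = [2]``
--
--         Then, ``[∇f₃] = grad_batch[mapping]``.
--
--     Returns:
--         [int] or None: Index mapping for samples to output index. ``None`` if the
--             mapping is the identity.
--
--     Raises:
--          ValueError: If one of the requested samples is not contained in all samples.
--     """
--     if not is_subset(idx_samples, idx_all):
--         raise ValueError(f"Requested samples {idx_samples} must be subset of {idx_all}")
--
--     if idx_all is None:
--         mapping = idx_samples
--     else:
--         mapping = [idx_all.index(sample) for sample in idx_samples]
--
--     return mapping
-- ===== SOURCE B (Python) =====
-- def sample_output_mapping(idx_samples, idx_all):
--     """Map requested sample indices to positions in the subsampling list.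
--
--     Transposed traversal: sweep idx_all once, stamping each still-empty slot of a
--     preallocated mapping whose sample matches the current reference element; stop
--     the sweep as soon as every slot is filled, and validate by unfilled slots.
--     """
--     if idx_all is None:
--         return idx_samples
--     mapping = [None] * len(idx_samples)
--     unfilled = len(idx_samples)
--     for i, v in enumerate(idx_all):
--         if unfilled == 0:
--             break
--         for j, s in enumerate(idx_samples):
--             if mapping[j] is None and s == v:
--                 mapping[j] = i
--                 unfilled -= 1
--     if None in mapping:
--         raise ValueError(f"Requested samples {idx_samples} must be subset of {idx_all}")
--     return mapping
-- ===== Notes on version B (the rewrite author's own statement) =====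
-- stated objective: alternative
-- what changed: Transposed traversal: instead of a set-based subset test followed by one idx_all.index scan per sample, B sweeps idx_all once, stamping each still-empty slot of a preallocated mapping whose sample matches the current element, and validates afterwards by checking for unfilled slots.
import Mathlib
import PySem

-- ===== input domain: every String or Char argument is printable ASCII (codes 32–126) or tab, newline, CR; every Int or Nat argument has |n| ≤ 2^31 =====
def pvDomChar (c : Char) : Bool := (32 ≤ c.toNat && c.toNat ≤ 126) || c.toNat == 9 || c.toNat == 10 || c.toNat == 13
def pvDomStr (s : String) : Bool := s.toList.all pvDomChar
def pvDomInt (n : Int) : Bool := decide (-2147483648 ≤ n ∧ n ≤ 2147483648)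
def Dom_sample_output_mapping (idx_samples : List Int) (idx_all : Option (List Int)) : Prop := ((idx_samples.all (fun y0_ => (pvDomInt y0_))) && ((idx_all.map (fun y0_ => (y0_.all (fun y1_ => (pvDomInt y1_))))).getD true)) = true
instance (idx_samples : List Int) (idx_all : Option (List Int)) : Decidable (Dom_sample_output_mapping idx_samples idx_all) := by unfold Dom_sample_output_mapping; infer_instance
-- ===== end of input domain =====

-- B transposes the traversal: one sweep over idx_all stamps still-empty slots of a
-- preallocated mapping, with validation by checking for unfilled slots (alternative
-- decomposition, same asymptotic cost).


-- ===== PORT A =====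
-- helper is_subset (the subsampling-is-None branch is unreachable: idx_samples is List Int here)
def pv_is_subset (subsampling : List Int) (reference : Option (List Int)) : Bool :=
  match reference with
  | none => true
  | some ref => PySem.Set.issubset (PySem.Set.ofList subsampling) (PySem.Set.ofList ref)

-- the comprehension `[idx_all.index(sample) for sample in idx_samples]` is mapM over
-- Option: `.index` raising ValueError = index? returning none, aborting the list
def sample_output_mapping (idx_samples : List Int) (idx_all : Option (List Int)) : Option (List Int) :=
  if ¬ pv_is_subset idx_samples idx_all then none   -- raise ValueError
  else
    match idx_all with
    | none => some idx_samples
    | some all => idx_samples.mapM (fun s => (PySem.List.index? all s).map (fun k : Nat => (k : Int)))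

-- ===== PORT B =====
-- inner loop `for j, s in enumerate(idx_samples): if mapping[j] is None and s == v: mapping[j] = i`:
-- slot j pairs with sample j, so the pass over j is a zipWith of samples against slots
def pv_stamp (idx_samples : List Int) (acc : List (Option Int)) (i : Int) (v : Int) : List (Option Int) :=
  List.zipWith (fun s o => if o = none ∧ s = v then some i else o) idx_samples acc

-- counter `unfilled` decremented once per stamp in the inner pass: the number of
-- (sample, slot) pairs with an empty slot matching v
def pv_stamp_count (idx_samples : List Int) (acc : List (Option Int)) (v : Int) : Nat :=
  (idx_samples.zip acc).countP (fun q => decide (q.2 = none ∧ q.1 = v))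

-- one outer-loop iteration; `if unfilled == 0: break` is modelled as the state
-- staying unchanged for the rest of the fold (exactly what break produces)
def pv_step (idx_samples : List Int) (st : List (Option Int) × Int) (p : Int × Int) :
    List (Option Int) × Int :=
  if st.2 = 0 then st
  else (pv_stamp idx_samples st.1 p.1 p.2,
        st.2 - (pv_stamp_count idx_samples st.1 p.2 : Int))

-- `if None in mapping: raise … ; return mapping` = unwrap every slot, none aborts (ValueError)
def sample_output_mapping_alt (idx_samples : List Int) (idx_all : Option (List Int)) : Option (List Int) :=
  match idx_all with
  | none => some idx_samples
  | some all =>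
    let st := (PySem.List.enumerate all).foldl (pv_step idx_samples)
      (List.replicate idx_samples.length none, (idx_samples.length : Int))
    st.1.mapM id

-- ===== PRECONDITION & SPEC =====
-- Pre_ excludes exactly the inputs where Python A raises ValueError: some requested
-- sample not contained in idx_all (with idx_all not None).
def Pre_sample_output_mapping (idx_samples : List Int) (idx_all : Option (List Int)) : Prop :=
  (idx_all.map (fun all => idx_samples.all (fun s => all.contains s))).getD true = true
instance (idx_samples : List Int) (idx_all : Option (List Int)) : Decidable (Pre_sample_output_mapping idx_samples idx_all) := by unfold Pre_sample_output_mapping; infer_instance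

def pvWitness_sample_output_mapping : List Int × Option (List Int) := ([0, 2, 3], some [0, 1, 2, 3, 4])

def Spec_sample_output_mapping (idx_samples : List Int) (idx_all : Option (List Int)) (out : Option (List Int)) : Prop := out = sample_output_mapping_alt idx_samples idx_all
instance (idx_samples : List Int) (idx_all : Option (List Int)) (out : Option (List Int)) : Decidable (Spec_sample_output_mapping idx_samples idx_all out) := by unfold Spec_sample_output_mapping; infer_instance

-- ===== CLAIM (what is proved, stated in full; the proofs are below) =====
def Claim_equal_sample_output_mapping : Prop := ∀ (idx_samples : List Int) (idx_all : Option (List Int)), Dom_sample_output_mapping idx_samples idx_all → Pre_sample_output_mapping idx_samples idx_all → Spec_sample_output_mapping idx_samples idx_all (sample_output_mapping idx_samples idx_all)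

-- ===== LEMMAS AND PROOFS =====

-- one stamping pass applied to a map-shaped accumulator stays map-shaped
theorem pv_stamp_map (samples : List Int) (f : Int → Option Int) (i v : Int) :
    pv_stamp samples (samples.map f) i v
      = samples.map (fun s => if f s = none ∧ s = v then some i else f s) := by
  unfold pv_stamp
  induction samples with
  | nil => rfl
  | cons x xs ih => simp [ih]

-- loop invariant of the sweep over the remaining suffix of idx_all, started at index i:
-- already-stamped slots keep their value, empty slots get the first occurrence in the
-- suffix, offset by i
theorem pv_sweep_get (suf : List Int) (samples : List Int) (f : Int → Option Int) (i : Int) :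
    (PySem.List.enumerate suf i).foldl
        (fun acc p => pv_stamp samples acc p.1 p.2) (samples.map f)
      = samples.map (fun s =>
          match f s with
          | some x => some x
          | none => (PySem.List.index? suf s).map (fun k : Nat => i + (k : Int))) := by
  induction suf generalizing f i with
  | nil =>
    simp only [PySem.List.enumerate_nil, List.foldl_nil]
    apply List.map_congr_left
    intro s _
    rw [(PySem.List.index?_eq_none_iff [] s).mpr (by simp)]
    cases f s <;> rfl
  | cons v vs ih =>
    rw [PySem.List.enumerate_cons, List.foldl_cons, pv_stamp_map, ih]
    apply List.map_congr_left
    intro s _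
    by_cases hv : s = v
    · subst hv
      cases hf : f s with
      | some x => simp
      | none =>
        rw [PySem.List.index?_cons_self]
        simp
    · rw [PySem.List.index?_cons_of_ne vs (fun h => hv (Eq.symm h))]
      cases hf : f s with
      | some x => simp [hv]
      | none =>
        simp only [hv, and_false, if_false, Option.map_map]
        cases PySem.List.index? vs s with
        | none => rfl
        | some k =>
          simp only [Option.map_some, Function.comp_apply]
          congr 1
          push_cast
          ring


-- stamping preserves slot-list length
theorem pv_stamp_length (samples : List Int) (acc : List (Option Int)) (i v : Int)
    (h : acc.length = samples.length) :
    (pv_stamp samples acc i v).length = samples.length := by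
  simp [pv_stamp, h]

-- the counter update matches the number of empty slots the stamp fills
theorem pv_stamp_count_none (samples : List Int) (acc : List (Option Int)) (i v : Int)
    (h : acc.length = samples.length) :
    ((pv_stamp samples acc i v).count none : Int)
      = (acc.count none : Int) - (pv_stamp_count samples acc v : Int) := by
  unfold pv_stamp pv_stamp_count
  induction samples generalizing acc with
  | nil => cases acc <;> simp at h ⊢
  | cons s ss ih =>
    cases acc with
    | nil => simp at h
    | cons o os =>
      simp only [List.length_cons, Nat.add_right_cancel_iff] at h
      simp only [List.zipWith, List.zip_cons_cons, List.countP_cons, List.count_cons]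
      have := ih os h
      by_cases h1 : o = none <;> by_cases h2 : s = v <;>
        simp [h1, h2, this] <;> omega

-- when no slot is empty the stamp is the identity
theorem pv_stamp_of_full (samples : List Int) (acc : List (Option Int)) (i v : Int)
    (h : acc.length = samples.length) (hz : acc.count none = 0) :
    pv_stamp samples acc i v = acc := by
  unfold pv_stamp
  induction samples generalizing acc with
  | nil => cases acc <;> simp at h ⊢
  | cons s ss ih =>
    cases acc with
    | nil => simp at h
    | cons o os =>
      simp only [List.length_cons, Nat.add_right_cancel_iff] at h
      rw [List.count_cons] at hz
      have ho : o ≠ none := by intro he; simp [he] at hz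
      simp only [List.zipWith, ho, false_and, if_false]
      rw [ih os h (by omega)]

-- break elimination: while the counter mirrors the number of empty slots, the fold
-- with the early exit produces the same slots as the plain sweep
theorem pv_break_elim (samples : List Int) (l : List (Int × Int)) (acc : List (Option Int))
    (h : acc.length = samples.length) :
    (l.foldl (pv_step samples) (acc, (acc.count none : Int))).1
      = l.foldl (fun a p => pv_stamp samples a p.1 p.2) acc := by
  induction l generalizing acc with
  | nil => rfl
  | cons p l ih =>
    simp only [List.foldl_cons]
    by_cases hz : acc.count none = 0
    · rw [pv_step, if_pos (by simp [hz]), ih acc h,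
        pv_stamp_of_full samples acc p.1 p.2 h hz]
    · rw [pv_step, if_neg (by simp [hz]),
        ← pv_stamp_count_none samples acc p.1 p.2 h]
      exact ih _ (pv_stamp_length samples acc p.1 p.2 h)

-- mapM over a pre-mapped list = mapM of the composed function (used to align the
-- final unwrap of B with A's comprehension)
theorem pv_mapM_map {a b : Type} (l : List a) (g : a -> Option b) :
    (l.map g).mapM id = l.mapM g := by
  induction l with
  | nil => rfl
  | cons x xs ih => simp [List.mapM_cons, ih]

-- ===== VERDICT (by name: the statement is the Claim_ definition above) =====
theorem sample_output_mapping_spec : Claim_equal_sample_output_mapping := by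
  intro idx_samples idx_all _ hpre
  unfold Spec_sample_output_mapping
  cases idx_all with
  | none => simp [sample_output_mapping, sample_output_mapping_alt, pv_is_subset]
  | some all =>
    unfold Pre_sample_output_mapping at hpre
    simp only [Option.map_some, Option.getD_some] at hpre
    have hsub : pv_is_subset idx_samples (some all) = true := by
      unfold pv_is_subset
      rw [PySem.Set.issubset_iff]
      intro x hx
      rw [PySem.Set.mem_ofList] at hx ⊢
      simpa using List.all_eq_true.mp hpre x hx
    have hrep : (List.replicate idx_samples.length (none : Option Int))
        = idx_samples.map (fun _ => none) := by
      simp [List.map_const']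
    simp only [sample_output_mapping, sample_output_mapping_alt, hsub]
    have hlen : (List.replicate idx_samples.length (none : Option Int)).length
        = idx_samples.length := by simp
    have hcnt : ((List.replicate idx_samples.length (none : Option Int)).count none : Int)
        = (idx_samples.length : Int) := by simp
    rw [← hcnt, pv_break_elim idx_samples _ _ hlen, hrep, pv_sweep_get,
      if_neg (by simp), pv_mapM_map]
    simp
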